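-- pv_equiv track=rewrite | github.com/CharlesHawkinsMSU/PMN-Pipeline | bin/pmn.py | interp_backslashes
-- ===== SOURCE A (Python) =====
-- def interp_backslashes(s):
-- 	s2 = ''
-- 	i = 0
-- 	l = len(s)
-- 	while i < l:
-- 		c = s[i]
-- 		if c == '\\':
-- 			i += 1
-- 			try:
-- 				c2 = s[i]
-- 				if c2 == 't':
-- 					s2 += '\t'
-- 				else:
-- 					s2 += c2
-- 			except IndexError:
-- 				s2 += c
-- 		else:
-- 			s2 += c
-- 		i += 1
-- 	return s2
-- ===== SOURCE B (Python) =====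
-- def interp_backslashes(s):
--     # Staged approach: cut the string at every backslash, then reassemble the
--     # pieces, interpreting the first character of each later piece as the
--     # escaped character ('t' -> tab); an empty piece means the backslash was
--     # followed by another backslash (its piece is then plain text) or by
--     # nothing (a trailing lone backslash stays literal).
--     parts = s.split('\\')
--     out = [parts[0]]
--     i = 1
--     n = len(parts)
--     while i < n:
--         p = parts[i]
--         if p:
--             out.append(('\t' if p[0] == 't' else p[0]) + p[1:])
--             i += 1
--         else:
--             out.append('\\')
--             i += 1
--             if i < n:
--                 out.append(parts[i])
--                 i += 1
--     return ''.join(out)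
-- ===== Notes on version B (the rewrite author's own statement) =====
-- stated objective: faster
-- what changed: Replaced the character-by-character index state machine (with quadratic string += and try/except for the trailing backslash) by a staged split-on-backslash pass: split once, then reassemble the pieces interpreting each piece's first character as the escaped character, joined once at the end.
import Mathlib
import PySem

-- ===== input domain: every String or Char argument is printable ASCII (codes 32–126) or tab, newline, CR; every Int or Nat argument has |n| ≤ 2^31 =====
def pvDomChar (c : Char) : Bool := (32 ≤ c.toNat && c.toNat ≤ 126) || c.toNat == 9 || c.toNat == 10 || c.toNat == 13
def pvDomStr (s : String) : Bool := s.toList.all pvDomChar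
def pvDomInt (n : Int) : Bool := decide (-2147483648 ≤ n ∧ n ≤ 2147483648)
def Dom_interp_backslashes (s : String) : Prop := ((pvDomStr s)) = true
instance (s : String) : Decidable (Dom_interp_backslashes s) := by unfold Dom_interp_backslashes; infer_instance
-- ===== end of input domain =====

-- B replaces A's index/while state machine by a staged pass: split the string at every
-- backslash once, then rejoin the pieces with each later piece's first char interpreted
-- as the escaped char; same return value, a different (two-stage) decomposition.

-- ===== PORT A =====
-- A's while loop over index i, accumulating s2; s[i] out of range (the IndexError branch)
-- appends the backslash itself. Transliterated over the character list.
def interpALoop (cs : List Char) (i : Nat) (s2 : List Char) : List Char :=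
  if h : i < cs.length then
    let c := cs[i]
    if c = '\\' then
      match cs[i+1]? with
      | some c2 => interpALoop cs (i+2) (s2 ++ [if c2 = 't' then '\t' else c2])
      | none    => interpALoop cs (i+2) (s2 ++ [c])
    else interpALoop cs (i+1) (s2 ++ [c])
  else s2
termination_by cs.length - i

def interp_backslashes (s : String) : String :=
  String.ofList (interpALoop s.toList 0 [])

-- ===== PORT B =====
-- Source B's while loop over the split parts (index i stepping by 1 or 2): a nonempty part
-- contributes its escaped first char plus its rest; an empty part contributes a literal
-- backslash and, if a next part exists, that part verbatim.
def interpBParts : List (List Char) → List Char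
  | [] => []
  | p :: ps =>
      match p with
      | c :: rest => (if c = 't' then '\t' else c) :: rest ++ interpBParts ps
      | [] =>
          '\\' :: (match ps with
                   | [] => []
                   | q :: qs => q ++ interpBParts qs)

def interp_backslashes_alt (s : String) : String :=
  match PySem.Chars.splitOn s.toList ['\\'] with
  | [] => String.ofList []              -- unreachable: split never returns an empty list
  | p :: ps => String.ofList (p ++ interpBParts ps)

-- ===== PRECONDITION & SPEC =====
def Spec_interp_backslashes (s : String) (out : String) : Prop := out = interp_backslashes_alt s
instance (s : String) (out : String) : Decidable (Spec_interp_backslashes s out) := by unfold Spec_interp_backslashes; infer_instance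

-- ===== CLAIM (what is proved, stated in full; the proofs are below) =====
def Claim_equal_interp_backslashes : Prop := ∀ (s : String), Dom_interp_backslashes s → Spec_interp_backslashes s (interp_backslashes s)

-- ===== LEMMAS AND PROOFS =====

-- Simple structural characterisation of splitting at '\\'.
def splitC : List Char → List (List Char)
  | [] => [[]]
  | c :: rest =>
      if c = '\\' then [] :: splitC rest
      else
        match splitC rest with
        | [] => [[c]]              -- unreachable
        | p :: ps => (c :: p) :: ps

theorem splitC_ne_nil (l : List Char) : splitC l ≠ [] := by
  cases l with
  | nil => simp [splitC]
  | cons c rest =>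
    simp only [splitC]
    split
    · simp
    · split <;> simp

theorem go_eq (fuel : Nat) (l cur : List Char) (acc : List (List Char))
    (h : l.length < fuel) :
    PySem.Chars.splitOn.go ['\\'] fuel l cur acc =
      acc.reverse ++ ((cur.reverse ++ (splitC l).headI) :: (splitC l).tail) := by
  induction fuel generalizing l cur acc with
  | zero => omega
  | succ fuel ih =>
    cases l with
    | nil => simp [PySem.Chars.splitOn.go, splitC]
    | cons c rest =>
      by_cases hc : c = '\\'
      · have hpre : List.isPrefixOf ['\\'] (c :: rest) = true := by
          simp [List.isPrefixOf, hc]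
        rw [PySem.Chars.splitOn.go]
        simp only [hpre, if_pos, List.length_cons, List.length_nil, List.drop_succ_cons, List.drop_zero]
        rw [ih rest [] (cur.reverse :: acc) (by simpa using Nat.lt_of_succ_lt_succ h)]
        have hsc : (splitC rest).headI :: (splitC rest).tail = splitC rest := by
          cases hr : splitC rest with
          | nil => exact absurd hr (splitC_ne_nil rest)
          | cons p ps => simp
        simp [splitC, hc, hsc]
      · have hpre : List.isPrefixOf ['\\'] (c :: rest) = false := by
          simp [List.isPrefixOf]
          exact fun hcon => hc hcon.symm
        rw [PySem.Chars.splitOn.go]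
        simp only [hpre, Bool.false_eq_true, if_neg, not_false_iff]
        rw [ih rest (c :: cur) acc (by simpa using Nat.lt_of_succ_lt_succ h)]
        cases hr : splitC rest with
        | nil => exact absurd hr (splitC_ne_nil rest)
        | cons p ps => simp [splitC, hc, hr]

theorem splitOn_eq_splitC (l : List Char) :
    PySem.Chars.splitOn l ['\\'] = splitC l := by
  have := go_eq (l.length + 1) l [] [] (by omega)
  have hsc : (splitC l).headI :: (splitC l).tail = splitC l := by
    cases hr : splitC l with
    | nil => exact absurd hr (splitC_ne_nil l)
    | cons p ps => simp
  simpa [PySem.Chars.splitOn, hsc] using this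

-- The canonical pair-consuming recursion both programs compute.
def interpB : List Char → List Char
  | [] => []
  | c :: rest =>
      if c = '\\' then
        match rest with
        | [] => [c]
        | c2 :: rest' => (if c2 = 't' then '\t' else c2) :: interpB rest'
      else c :: interpB rest

theorem interpALoop_eq (cs : List Char) (i : Nat) (s2 : List Char) :
    interpALoop cs i s2 = s2 ++ interpB (cs.drop i) := by
  induction hn : cs.length - i using Nat.strong_induction_on generalizing i s2 with
  | _ n ih =>
    by_cases h : i < cs.length
    · have hdrop : cs.drop i = cs[i] :: cs.drop (i+1) := List.drop_eq_getElem_cons h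
      by_cases hc : cs[i] = '\\'
      · cases hget : cs[i+1]? with
        | some c2 =>
          obtain ⟨h1, hval⟩ := List.getElem?_eq_some_iff.mp hget
          have hdrop1 : cs.drop (i+1) = c2 :: cs.drop (i+2) := by
            rw [List.drop_eq_getElem_cons h1, hval]
          rw [interpALoop]
          simp only [h, dif_pos, hc, if_pos, hget]
          rw [ih (cs.length - (i+2)) (by omega) (i+2) _ rfl]
          rw [hdrop, hdrop1, hc]
          simp [interpB]
        | none =>
          have h1 : cs.length ≤ i + 1 := by
            by_contra hlt
            exact absurd hget (by simp only [List.getElem?_eq_none_iff]; omega)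
          have hdrop1 : cs.drop (i+1) = [] := List.drop_eq_nil_of_le h1
          rw [interpALoop]
          simp only [h, dif_pos, hc, if_pos, hget]
          rw [ih (cs.length - (i+2)) (by omega) (i+2) _ rfl]
          rw [List.drop_eq_nil_of_le (by omega : cs.length ≤ i + 2)]
          rw [hdrop, hdrop1, hc]
          simp [interpB]
      · rw [interpALoop]
        simp only [h, dif_pos, hc, if_neg, not_false_iff]
        rw [ih (cs.length - (i+1)) (by omega) (i+1) _ rfl]
        rw [hdrop]
        cases hd : cs.drop (i+1) <;> simp [interpB, hc]
    · rw [interpALoop]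
      simp [h, List.drop_eq_nil_of_le (by omega : cs.length ≤ i), interpB]

theorem interpB_cons_of_ne {c : Char} (rest : List Char) (hc : c ≠ '\\') :
    interpB (c :: rest) = c :: interpB rest := by
  cases rest <;> simp [interpB, hc]

theorem parts_eq_interpB (l : List Char) :
    (splitC l).headI ++ interpBParts (splitC l).tail = interpB l := by
  induction hn : l.length using Nat.strong_induction_on generalizing l with
  | _ n ih =>
    cases l with
    | nil => simp [splitC, interpB, interpBParts]
    | cons c rest =>
      by_cases hc : c = '\\'
      · subst hc
        cases rest with
        | nil => simp [splitC, interpB, interpBParts]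
        | cons c2 rest' =>
          by_cases hc2 : c2 = '\\'
          · subst hc2
            have hr' := ih rest'.length (by simp only [List.length_cons] at hn; omega) rest' rfl
            have hsc : (splitC rest').headI :: (splitC rest').tail = splitC rest' := by
              cases hr : splitC rest' with
              | nil => exact absurd hr (splitC_ne_nil rest')
              | cons p ps => simp
            simp only [splitC, if_pos]
            rw [← hsc]
            simp [interpBParts, interpB, hr']
          · have hr' := ih rest'.length (by simp only [List.length_cons] at hn; omega) rest' rfl
            simp only [splitC, if_pos, if_neg hc2]
            cases hr : splitC rest' with
            | nil => exact absurd hr (splitC_ne_nil rest')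
            | cons p ps =>
              rw [hr] at hr'
              simp only [List.headI, List.tail] at hr' ⊢
              simp [interpBParts, interpB, hr']
      · have hr := ih rest.length (by simp only [List.length_cons] at hn; omega) rest rfl
        simp only [splitC, if_neg hc]
        cases hsr : splitC rest with
        | nil => exact absurd hsr (splitC_ne_nil rest)
        | cons p ps =>
          rw [hsr] at hr
          simp only [List.headI, List.tail] at hr ⊢
          rw [interpB_cons_of_ne rest hc]
          exact congrArg (List.cons c) hr

-- ===== VERDICT (by name: the statement is the Claim_ definition above) =====
theorem interp_backslashes_spec : Claim_equal_interp_backslashes := by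
  intro s _
  unfold Spec_interp_backslashes interp_backslashes interp_backslashes_alt
  rw [interpALoop_eq, splitOn_eq_splitC]
  cases hsr : splitC s.toList with
  | nil => exact absurd hsr (splitC_ne_nil s.toList)
  | cons p ps =>
    have := parts_eq_interpB s.toList
    rw [hsr] at this
    simp only [List.headI, List.tail] at this
    simp [this]
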